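-- pv_equiv track=rewrite | github.com/philipjones77/arbPlusJAX | src/arbplusjax/public_metadata.py | _build_implementation_index
-- ===== SOURCE A (Python) =====
-- from typing import Any, Callable, Container, Mapping
--
-- _ALT_PREFIXES = ("boost_", "cuda_", "cusf_", "mpmath_", "scipy_", "shahen_")
--
-- _ALT_SUFFIXES = (
--     "_batch_prec_jit",
--     "_batch_jit",
--     "_batch_prec",
--     "_prec_jit",
--     "_point",
--     "_mode",
--     "_rigorous",
--     "_batch",
--     "_prec",
--     "_jit",
-- )
--
-- def _normalize_implementation_base(name: str) -> str:
--     leaf = name.rsplit(".", 1)[-1].lower()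
--     for prefix in _ALT_PREFIXES:
--         if leaf.startswith(prefix):
--             leaf = leaf[len(prefix) :]
--             break
--     for suffix in _ALT_SUFFIXES:
--         if leaf.endswith(suffix):
--             leaf = leaf[: -len(suffix)]
--             break
--     if leaf.startswith(("arb_", "acb_")):
--         leaf = leaf[4:]
--     return leaf
--
-- def _build_implementation_index(public_registry: Mapping[str, Callable]) -> dict[str, tuple[str, ...]]:
--     grouped: dict[str, set[str]] = {}
--     for candidate in public_registry:
--         if "." in candidate:
--             continue
--         base = _normalize_implementation_base(candidate)
--         grouped.setdefault(base, set()).add(candidate)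
--     return {base: tuple(sorted(values)) for base, values in grouped.items()}
-- ===== SOURCE B (Python) =====
-- _ALT_PREFIXES = ("boost_", "cuda_", "cusf_", "mpmath_", "scipy_", "shahen_")
--
-- _ALT_SUFFIXES = (
--     "_batch_prec_jit",
--     "_batch_jit",
--     "_batch_prec",
--     "_prec_jit",
--     "_point",
--     "_mode",
--     "_rigorous",
--     "_batch",
--     "_prec",
--     "_jit",
-- )
--
-- def _normalize_base(name):
--     leaf = name[name.rfind(".") + 1:].lower()
--     leaf = next((leaf[len(p):] for p in _ALT_PREFIXES if leaf.startswith(p)), leaf)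
--     leaf = next((leaf[:-len(s)] for s in _ALT_SUFFIXES if leaf.endswith(s)), leaf)
--     return leaf[4:] if leaf.startswith(("arb_", "acb_")) else leaf
--
-- def _build_implementation_index(public_registry):
--     index = {}
--     rest = [(name, _normalize_base(name)) for name in public_registry if "." not in name]
--     while rest:
--         base = rest[0][1]
--         index[base] = tuple(sorted(n for n, b in rest if b == base))
--         rest = [(n, b) for n, b in rest if b != base]
--     return index
-- ===== Notes on version B (the rewrite author's own statement) =====
-- stated objective: alternative
-- what changed: A's single-pass dict-of-sets accumulation (setdefault/add, then a per-group sort of each set) is replaced by an extract-partition loop -- repeatedly take the first remaining name's normalized base, emit that whole group sorted, and drop it from the worklist -- with a table-driven normalizer (next() over the prefix/suffix tables) instead of A's break-out for-loops.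
import Mathlib
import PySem

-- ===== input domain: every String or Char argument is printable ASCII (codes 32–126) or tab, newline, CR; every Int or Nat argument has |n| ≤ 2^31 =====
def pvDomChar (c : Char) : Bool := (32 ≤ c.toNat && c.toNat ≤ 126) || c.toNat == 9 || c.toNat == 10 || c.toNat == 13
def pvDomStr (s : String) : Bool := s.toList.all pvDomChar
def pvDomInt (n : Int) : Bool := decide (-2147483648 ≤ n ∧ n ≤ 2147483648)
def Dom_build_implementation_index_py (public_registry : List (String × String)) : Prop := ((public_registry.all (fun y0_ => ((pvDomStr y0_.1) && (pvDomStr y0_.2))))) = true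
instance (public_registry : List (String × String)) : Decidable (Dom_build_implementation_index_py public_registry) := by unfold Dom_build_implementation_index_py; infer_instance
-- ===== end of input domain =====

-- B replaces A's one-pass dict-of-sets accumulation by an extract-partition loop (repeatedly take the
-- first remaining name's base, emit its whole sorted group, drop it from the worklist) with a
-- table-driven normalizer; objective: alternative decomposition, not claimed faster.

-- ===== PORT A =====
-- A's helper _normalize_implementation_base, transliterated step for step.
-- name.rsplit(".", 1)[-1] : the part after the LAST '.', the whole string if there is none (exact)
def pvRsplitLast (name : String) : String :=
  let i := PySem.Str.rfind name "."
  if i == -1 then name else PySem.Str.slice name (some (i + 1)) none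

-- the prefix loop of _normalize_implementation_base: first matching prefix is stripped, then break
def pvStripPrefix (leaf : String) : String :=
  if PySem.Str.startswith leaf "boost_" then PySem.Str.slice leaf (some 6) none
  else if PySem.Str.startswith leaf "cuda_" then PySem.Str.slice leaf (some 5) none
  else if PySem.Str.startswith leaf "cusf_" then PySem.Str.slice leaf (some 5) none
  else if PySem.Str.startswith leaf "mpmath_" then PySem.Str.slice leaf (some 7) none
  else if PySem.Str.startswith leaf "scipy_" then PySem.Str.slice leaf (some 6) none
  else if PySem.Str.startswith leaf "shahen_" then PySem.Str.slice leaf (some 7) none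
  else leaf

-- the suffix loop: first matching suffix is stripped (leaf[:-len(suffix)]), then break
def pvStripSuffix (leaf : String) : String :=
  if PySem.Str.endswith leaf "_batch_prec_jit" then PySem.Str.slice leaf none (some (-15))
  else if PySem.Str.endswith leaf "_batch_jit" then PySem.Str.slice leaf none (some (-10))
  else if PySem.Str.endswith leaf "_batch_prec" then PySem.Str.slice leaf none (some (-11))
  else if PySem.Str.endswith leaf "_prec_jit" then PySem.Str.slice leaf none (some (-9))
  else if PySem.Str.endswith leaf "_point" then PySem.Str.slice leaf none (some (-6))
  else if PySem.Str.endswith leaf "_mode" then PySem.Str.slice leaf none (some (-5))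
  else if PySem.Str.endswith leaf "_rigorous" then PySem.Str.slice leaf none (some (-9))
  else if PySem.Str.endswith leaf "_batch" then PySem.Str.slice leaf none (some (-6))
  else if PySem.Str.endswith leaf "_prec" then PySem.Str.slice leaf none (some (-5))
  else if PySem.Str.endswith leaf "_jit" then PySem.Str.slice leaf none (some (-4))
  else leaf

def pvNormalizeBase (name : String) : String :=
  let leaf0 := PySem.Str.lower (pvRsplitLast name)
  let leaf1 := pvStripPrefix leaf0
  let leaf2 := pvStripSuffix leaf1
  if PySem.Str.startswith leaf2 "arb_" || PySem.Str.startswith leaf2 "acb_" then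
    PySem.Str.slice leaf2 (some 4) none
  else leaf2

def build_implementation_index_py (public_registry : List (String × String)) : List (String × List String) :=
  -- 'for candidate in public_registry' iterates the dict's keys in insertion order
  let grouped : PySem.Dict String (PySem.Set String) :=
    ((PySem.Dict.ofList public_registry).keys).foldl
      (fun g candidate =>
        if PySem.Str.isIn "." candidate then g
        else
          let base := pvNormalizeBase candidate
          -- grouped.setdefault(base, set()).add(candidate)
          g.insert base (PySem.Set.add (g.getD base PySem.Set.empty) candidate))
      PySem.Dict.empty
  grouped.items.map (fun p => (p.1, PySem.List.sorted p.2 (fun x => x) false))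

-- ===== PORT B =====
-- B's normalizer is table-driven: the first matching prefix/suffix is found with next(...)/find?.
def pvAltPrefixes : List String := ["boost_", "cuda_", "cusf_", "mpmath_", "scipy_", "shahen_"]
def pvAltSuffixes : List String :=
  ["_batch_prec_jit", "_batch_jit", "_batch_prec", "_prec_jit", "_point",
   "_mode", "_rigorous", "_batch", "_prec", "_jit"]

def pvNormB (name : String) : String :=
  -- name[name.rfind(".") + 1 :].lower()
  let leaf0 := PySem.Str.lower (PySem.Str.slice name (some (PySem.Str.rfind name "." + 1)) none)
  let leaf1 := match pvAltPrefixes.find? (fun p => PySem.Str.startswith leaf0 p) with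
    | some p => PySem.Str.slice leaf0 (some (PySem.Str.len p)) none
    | none => leaf0
  let leaf2 := match pvAltSuffixes.find? (fun s => PySem.Str.endswith leaf1 s) with
    | some s => PySem.Str.slice leaf1 none (some (-(PySem.Str.len s)))
    | none => leaf1
  if PySem.Str.startswith leaf2 "arb_" || PySem.Str.startswith leaf2 "acb_" then
    PySem.Str.slice leaf2 (some 4) none
  else leaf2

-- B's while-loop: pull the first remaining (name, base) pair's base, emit that whole group
-- (names, sorted), and drop it from the worklist
def pvGroupRec (rest : List (String × String)) : List (String × List String) :=
  match rest with
  | [] => []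
  | p :: t =>
    let base := p.2
    (base, PySem.List.sorted (((p :: t).filter (fun q => q.2 == base)).map (fun q => q.1))
        (fun x => x) false)
      :: pvGroupRec (t.filter (fun q => !(q.2 == base)))
termination_by rest.length
decreasing_by
  simpa using Nat.lt_succ_of_le (le_trans (List.length_filter_le _ t.attach) (by simp))

def build_implementation_index_py_alt (public_registry : List (String × String)) : List (String × List String) :=
  -- rest = [(name, _normalize_base(name)) for name in public_registry if "." not in name]
  pvGroupRec ((((PySem.Dict.ofList public_registry).keys).filter
    (fun name => !(PySem.Str.isIn "." name))).map (fun name => (name, pvNormB name)))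

-- ===== PRECONDITION & SPEC =====
def Spec_build_implementation_index_py (public_registry : List (String × String)) (out : List (String × List String)) : Prop := out = build_implementation_index_py_alt public_registry
instance (public_registry : List (String × String)) (out : List (String × List String)) : Decidable (Spec_build_implementation_index_py public_registry out) := by unfold Spec_build_implementation_index_py; infer_instance

-- ===== CLAIM (what is proved, stated in full; the proofs are below) =====
def Claim_equal_build_implementation_index_py : Prop := ∀ (public_registry : List (String × String)), Dom_build_implementation_index_py public_registry → Spec_build_implementation_index_py public_registry (build_implementation_index_py public_registry)

-- ===== LEMMAS AND PROOFS =====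

-- the two normalizers agree, piece by piece
theorem pvHead_eq (name : String) :
    PySem.Str.slice name (some (PySem.Str.rfind name "." + 1)) none = pvRsplitLast name := by
  unfold pvRsplitLast
  by_cases h : PySem.Str.rfind name "." = -1
  · rw [h]
    norm_num
    apply String.toList_inj.mp
    simp [pysem]
  · rw [if_neg (by simpa using h)]

theorem pvPrefix_eq (leaf : String) :
    (match pvAltPrefixes.find? (fun p => PySem.Str.startswith leaf p) with
      | some p => PySem.Str.slice leaf (some (PySem.Str.len p)) none
      | none => leaf) = pvStripPrefix leaf := by
  unfold pvStripPrefix pvAltPrefixes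
  simp only [List.find?]
  by_cases h1 : PySem.Str.startswith leaf "boost_" = true
  · rw [h1]; simp
  simp only [Bool.not_eq_true] at h1
  rw [h1]
  by_cases h2 : PySem.Str.startswith leaf "cuda_" = true
  · rw [h2]; simp
  simp only [Bool.not_eq_true] at h2
  rw [h2]
  by_cases h3 : PySem.Str.startswith leaf "cusf_" = true
  · rw [h3]; simp
  simp only [Bool.not_eq_true] at h3
  rw [h3]
  by_cases h4 : PySem.Str.startswith leaf "mpmath_" = true
  · rw [h4]; simp
  simp only [Bool.not_eq_true] at h4
  rw [h4]
  by_cases h5 : PySem.Str.startswith leaf "scipy_" = true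
  · rw [h5]; simp
  simp only [Bool.not_eq_true] at h5
  rw [h5]
  by_cases h6 : PySem.Str.startswith leaf "shahen_" = true
  · rw [h6]; simp
  simp only [Bool.not_eq_true] at h6
  rw [h6]
  simp

theorem pvSuffix_eq (leaf : String) :
    (match pvAltSuffixes.find? (fun s => PySem.Str.endswith leaf s) with
      | some s => PySem.Str.slice leaf none (some (-(PySem.Str.len s)))
      | none => leaf) = pvStripSuffix leaf := by
  unfold pvStripSuffix pvAltSuffixes
  simp only [List.find?]
  by_cases h1 : PySem.Str.endswith leaf "_batch_prec_jit" = true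
  · rw [h1]; simp
  simp only [Bool.not_eq_true] at h1
  rw [h1]
  by_cases h2 : PySem.Str.endswith leaf "_batch_jit" = true
  · rw [h2]; simp
  simp only [Bool.not_eq_true] at h2
  rw [h2]
  by_cases h3 : PySem.Str.endswith leaf "_batch_prec" = true
  · rw [h3]; simp
  simp only [Bool.not_eq_true] at h3
  rw [h3]
  by_cases h4 : PySem.Str.endswith leaf "_prec_jit" = true
  · rw [h4]; simp
  simp only [Bool.not_eq_true] at h4
  rw [h4]
  by_cases h5 : PySem.Str.endswith leaf "_point" = true
  · rw [h5]; simp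
  simp only [Bool.not_eq_true] at h5
  rw [h5]
  by_cases h6 : PySem.Str.endswith leaf "_mode" = true
  · rw [h6]; simp
  simp only [Bool.not_eq_true] at h6
  rw [h6]
  by_cases h7 : PySem.Str.endswith leaf "_rigorous" = true
  · rw [h7]; simp
  simp only [Bool.not_eq_true] at h7
  rw [h7]
  by_cases h8 : PySem.Str.endswith leaf "_batch" = true
  · rw [h8]; simp
  simp only [Bool.not_eq_true] at h8
  rw [h8]
  by_cases h9 : PySem.Str.endswith leaf "_prec" = true
  · rw [h9]; simp
  simp only [Bool.not_eq_true] at h9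
  rw [h9]
  by_cases h10 : PySem.Str.endswith leaf "_jit" = true
  · rw [h10]; simp
  simp only [Bool.not_eq_true] at h10
  rw [h10]
  simp

theorem pvNormB_eq (name : String) : pvNormB name = pvNormalizeBase name := by
  simp only [pvNormB, pvNormalizeBase]
  rw [pvHead_eq, pvPrefix_eq, pvSuffix_eq]

-- abbreviations for A's fold (proof-only; definitionally equal to the port's inline lambda)
def pvStepA (g : PySem.Dict String (PySem.Set String)) (candidate : String) :
    PySem.Dict String (PySem.Set String) :=
  if PySem.Str.isIn "." candidate then g
  else
    let base := pvNormalizeBase candidate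
    g.insert base (PySem.Set.add (g.getD base PySem.Set.empty) candidate)

def pvElig (ks : List String) : List String :=
  ks.filter (fun name => !(PySem.Str.isIn "." name))

def pvBases (ks : List String) : List String :=
  PySem.Set.ofList ((pvElig ks).map pvNormalizeBase)

theorem pvBases_nodup (ks : List String) : (pvBases ks).Nodup :=
  PySem.Set.nodup_ofList _

theorem pvMem_bases (ks : List String) (b : String) :
    b ∈ pvBases ks ↔ ∃ n ∈ pvElig ks, pvNormalizeBase n = b := by
  rw [pvBases, PySem.Set.mem_ofList]
  simp [eq_comm]

-- the groups invariant: A's dict after the loop, as items, is the bases-to-members table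
theorem pvGroups_invariant (ks : List String) (hnd : ks.Nodup) :
    (ks.foldl pvStepA PySem.Dict.empty).items
      = (pvBases ks).map
          (fun b => (b, (pvElig ks).filter (fun n => pvNormalizeBase n == b))) := by
  induction ks using List.reverseRecOn with
  | nil => rfl
  | append_singleton ks c ih =>
    have hnds := List.nodup_append.mp hnd
    have hnd' : ks.Nodup := hnds.1
    have hc : c ∉ ks := fun h => hnds.2.2 c h c (List.mem_singleton_self c) rfl
    have ih' := ih hnd'
    obtain ⟨g, hg⟩ : ∃ g, ks.foldl pvStepA PySem.Dict.empty = g := ⟨_, rfl⟩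
    rw [hg] at ih'
    have hkeys : g.keys = pvBases ks := by
      show g.items.map (·.1) = pvBases ks
      have hpr : ((·.1 : String × List String → String)
          ∘ fun b => (b, (pvElig ks).filter (fun n => pvNormalizeBase n == b)))
          = fun b => b := rfl
      rw [ih', List.map_map, hpr, List.map_id']
    have hkeysnd : g.keys.Nodup := by rw [hkeys]; exact pvBases_nodup ks
    cases hdot : PySem.Str.isIn "." c with
    | false =>
      -- eligible candidate ('.' not in c); b abbreviates its normalized base
      obtain ⟨b, hbase⟩ : ∃ b, pvNormalizeBase c = b := ⟨_, rfl⟩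
      have he : pvElig (ks ++ [c]) = pvElig ks ++ [c] := by
        simp only [pvElig, List.filter_append, List.filter_cons, List.filter_nil, hdot,
          Bool.not_false, if_true]
      have hstep : (ks ++ [c]).foldl pvStepA PySem.Dict.empty
          = g.insert b (PySem.Set.add (g.getD b PySem.Set.empty) c) := by
        rw [List.foldl_append, hg]
        simp only [List.foldl_cons, List.foldl_nil, pvStepA, hdot, Bool.false_eq_true, if_false,
          hbase]
      have hbB : pvBases (ks ++ [c]) = PySem.Set.add (pvBases ks) b := by
        unfold pvBases
        rw [he, List.map_append, PySem.Set.ofList_eq_foldl, List.foldl_append]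
        simp only [List.map_cons, List.map_nil, List.foldl_cons, List.foldl_nil, hbase]
        rw [← PySem.Set.ofList_eq_foldl]
      by_cases hmem : b ∈ pvBases ks
      · -- base already present: in-place update of one entry
        have hbB' : pvBases (ks ++ [c]) = pvBases ks := by
          rw [hbB, PySem.Set.add_eq_ite, if_pos hmem]
        have hcont : g.contains b = true := by
          rw [PySem.Dict.contains_iff_mem_keys, hkeys]; exact hmem
        have hpair : (b,
            (pvElig ks).filter (fun n => pvNormalizeBase n == b)) ∈ g.items := by
          rw [ih']; exact List.mem_map_of_mem hmem
        have hgetD : g.getD b PySem.Set.empty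
            = (pvElig ks).filter (fun n => pvNormalizeBase n == b) :=
          PySem.Dict.getD_of_mem_items g hpair hkeysnd _
        have hcnot : c ∉ (pvElig ks).filter (fun n => pvNormalizeBase n == b) := by
          intro hin
          have hin2 : c ∈ pvElig ks := List.mem_of_mem_filter hin
          exact hc (List.mem_of_mem_filter hin2)
        have hadd : PySem.Set.add (g.getD b PySem.Set.empty) c
            = (pvElig ks).filter (fun n => pvNormalizeBase n == b) ++ [c] := by
          rw [hgetD, PySem.Set.add_eq_ite, if_neg hcnot]
        rw [hstep, PySem.Dict.items_insert_of_contains g _ hcont, ih', hbB', he, List.map_map]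
        apply List.map_congr_left
        intro b' hb'
        by_cases hbb : b' = b
        · subst hbb
          simp only [Function.comp_apply, beq_self_eq_true, if_true, List.filter_append, List.filter_cons,
            List.filter_nil, hbase]
          rw [hadd]
        · have h1 : (b' == b) = false := by simpa using hbb
          have h2 : (b == b') = false := by
            simpa using (Ne.symm hbb)
          simp only [Function.comp_apply, h1, h2, hbase, Bool.false_eq_true, if_false, List.filter_append,
            List.filter_cons, List.filter_nil, List.append_nil]
      · -- new base: appended entry
        have hbB' : pvBases (ks ++ [c]) = pvBases ks ++ [b] := by
          rw [hbB, PySem.Set.add_eq_ite, if_neg hmem]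
        have hcont : g.contains b = false := by
          rw [← Bool.not_eq_true, PySem.Dict.contains_iff_mem_keys, hkeys]; exact hmem
        have hgetD : g.getD b PySem.Set.empty = PySem.Set.empty :=
          PySem.Dict.getD_of_not_contains g _ hcont
        have hfilt : (pvElig ks).filter (fun n => pvNormalizeBase n == b) = [] := by
          rw [List.filter_eq_nil_iff]
          intro n hn hb'
          exact hmem ((pvMem_bases ks b).mpr ⟨n, hn, by simpa using hb'⟩)
        rw [hstep, PySem.Dict.items_insert_of_not_contains g _ hcont, ih', hbB', he]
        simp only [List.map_append, List.map_cons, List.map_nil]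
        refine congrArg₂ (· ++ ·) ?_ ?_
        · apply List.map_congr_left
          intro b' hb'
          have hbb : b' ≠ b := fun h => hmem (h ▸ hb')
          have h2 : (b == b') = false := by
            simpa using (Ne.symm hbb)
          simp only [h2, hbase, Bool.false_eq_true, if_false,
            List.filter_append, List.filter_cons, List.filter_nil, List.append_nil]
        · rw [List.filter_append, hfilt, hgetD]
          simp only [List.nil_append, List.filter_cons, List.filter_nil, hbase,
            beq_self_eq_true, if_true]
          rfl
    | true =>
      -- skipped candidate ('.' in c): nothing changes
      have he : pvElig (ks ++ [c]) = pvElig ks := by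
        simp only [pvElig, List.filter_append, List.filter_cons, List.filter_nil, hdot,
          Bool.not_true, Bool.false_eq_true, if_false, List.append_nil]
      have hb : pvBases (ks ++ [c]) = pvBases ks := by
        unfold pvBases; rw [he]
      have hstep : (ks ++ [c]).foldl pvStepA PySem.Dict.empty = g := by
        rw [List.foldl_append, hg]
        simp only [List.foldl_cons, List.foldl_nil, pvStepA, hdot, if_true]
      rw [hstep, hb, he, ih']

-- once x is in the accumulator, later copies of x are no-ops for the Set.add fold
theorem pvFoldl_add_filter {α : Type} [BEq α] [LawfulBEq α] (x : α) :
    ∀ (xs acc : List α), x ∈ acc →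
      xs.foldl PySem.Set.add acc = (xs.filter (fun y => !(y == x))).foldl PySem.Set.add acc := by
  intro xs
  induction xs with
  | nil => intro acc _; rfl
  | cons y t ih =>
    intro acc h
    by_cases hyx : y = x
    · subst hyx
      have hadd : PySem.Set.add acc y = acc := by rw [PySem.Set.add_eq_ite, if_pos h]
      simp only [List.foldl_cons, List.filter_cons, beq_self_eq_true, Bool.not_true,
        Bool.false_eq_true, if_false, hadd]
      exact ih acc h
    · have hb : (y == x) = false := by simpa using hyx
      simp only [List.foldl_cons, List.filter_cons, hb, Bool.not_false, if_true]
      refine ih _ ?_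
      rw [PySem.Set.add_eq_ite]
      split_ifs with hm
      · exact h
      · exact List.mem_append_left _ h

-- a head element absent from the rest of the list survives the Set.add fold in front
theorem pvFoldl_add_cons {α : Type} [BEq α] [LawfulBEq α] (x : α) :
    ∀ (xs acc : List α), x ∉ xs →
      xs.foldl PySem.Set.add (x :: acc) = x :: xs.foldl PySem.Set.add acc := by
  intro xs
  induction xs with
  | nil => intro acc _; rfl
  | cons y t ih =>
    intro acc h
    have hyx : y ≠ x := fun he => h (he ▸ List.mem_cons_self ..)
    have hnx : x ∉ t := fun hm => h (List.mem_cons_of_mem _ hm)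
    have hadd : PySem.Set.add (x :: acc) y = x :: PySem.Set.add acc y := by
      rw [PySem.Set.add_eq_ite, PySem.Set.add_eq_ite]
      by_cases hm : y ∈ acc
      · rw [if_pos (List.mem_cons_of_mem _ hm), if_pos hm]
      · rw [if_neg (by simp [hyx, hm]), if_neg hm]
        rfl
    simp only [List.foldl_cons, hadd, ih _ hnx]

-- Set.ofList peels its head: first occurrence stays, later copies vanish
theorem pvOfList_cons {α : Type} [BEq α] [LawfulBEq α] (x : α) (xs : List α) :
    PySem.Set.ofList (x :: xs)
      = x :: PySem.Set.ofList (xs.filter (fun y => !(y == x))) := by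
  have h0 : PySem.Set.add ([] : List α) x = [x] := by
    rw [PySem.Set.add_eq_ite, if_neg (List.not_mem_nil)]
    rfl
  rw [PySem.Set.ofList_eq_foldl, PySem.Set.ofList_eq_foldl, List.foldl_cons, h0,
    pvFoldl_add_filter x xs [x] (List.mem_singleton_self x),
    pvFoldl_add_cons x _ [] (fun hm => by simp at hm)]

-- mapping a normalizer f commutes with dropping one base's names (f stays opaque here:
-- unfolding pvNormB during unification is prohibitively slow)
theorem pvFilterMapNorm (f : String → String) (t : List String) (b : String) :
    (List.map f t).filter (fun y => !(y == b))
      = (t.filter (fun m => !(f m == b))).map f := by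
  induction t with
  | nil => rfl
  | cons a t ih =>
    simp only [List.map_cons, List.filter_cons]
    cases h : (f a == b) with
    | false => simp only [Bool.not_false, if_true, List.map_cons, ih]
    | true => simp only [Bool.not_true, Bool.false_eq_true, if_false, ih]

-- one unfolding step of B's loop
theorem pvGroupRec_cons (p : String × String) (t : List (String × String)) :
    pvGroupRec (p :: t)
      = (p.2, PySem.List.sorted (((p :: t).filter (fun q => q.2 == p.2)).map (fun q => q.1))
          (fun x => x) false)
        :: pvGroupRec (t.filter (fun q => !(q.2 == p.2))) := by
  rw [pvGroupRec]

-- dropping one base's pairs commutes with pairing names with their bases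
theorem pvPairFilterNeg (f : String → String) (t : List String) (b : String) :
    (t.map (fun n => (n, f n))).filter (fun q => !(q.2 == b))
      = (t.filter (fun m => !(f m == b))).map (fun n => (n, f n)) := by
  induction t with
  | nil => rfl
  | cons a t ih =>
    simp only [List.map_cons, List.filter_cons]
    cases h : (f a == b) with
    | false => simp only [Bool.not_false, if_true, List.map_cons, ih]
    | true => simp only [Bool.not_true, Bool.false_eq_true, if_false, ih]

-- the names of one base's pairs are that base's names
theorem pvPairFilterPos (f : String → String) (l : List String) (b : String) :
    (((l.map (fun n => (n, f n))).filter (fun q => q.2 == b)).map (fun q => q.1))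
      = l.filter (fun m => f m == b) := by
  induction l with
  | nil => rfl
  | cons a t ih =>
    simp only [List.map_cons, List.filter_cons]
    cases h : (f a == b) with
    | false => simp only [Bool.false_eq_true, if_false, ih]
    | true => simp only [if_true, List.map_cons, ih]

-- B's extract-partition loop computes the bases-to-members table, for any normalizer f
theorem pvGroupRecGen_eq (f : String → String) : ∀ (l : List String),
    pvGroupRec (l.map (fun n => (n, f n)))
      = (PySem.Set.ofList (l.map f)).map
          (fun b => (b, PySem.List.sorted (l.filter (fun n => f n == b)) (fun x => x) false))
  | [] => by rw [List.map_nil, pvGroupRec]; rfl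
  | n :: t => by
    have ih := pvGroupRecGen_eq f (t.filter (fun m => !(f m == f n)))
    rw [List.map_cons, pvGroupRec_cons]
    rw [show ((n, f n) : String × String).2 = f n from rfl]
    rw [show ((n, f n) :: t.map (fun n => (n, f n)))
          = (n :: t).map (fun n => (n, f n)) from rfl]
    rw [pvPairFilterPos f (n :: t) (f n), pvPairFilterNeg f t (f n), ih]
    -- right-hand side: peel the head base off the ofList
    rw [List.map_cons, pvOfList_cons, List.map_cons, pvFilterMapNorm f t (f n)]
    refine congrArg₂ (· :: ·) rfl ?_
    apply List.map_congr_left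
    intro b hb
    obtain ⟨m, hm, hmb⟩ := List.mem_map.mp ((PySem.Set.mem_ofList _ _).mp hb)
    have hmf := List.of_mem_filter hm
    have hmne : (f m == f n) = false := by simpa using hmf
    have hbne : b ≠ f n := fun h => by rw [← hmb] at h; rw [h] at hmne; simp at hmne
    have hfl : (n :: t).filter (fun k => f k == b) = t.filter (fun k => f k == b) := by
      rw [List.filter_cons]
      have : (f n == b) = false := by simpa using (Ne.symm hbne)
      simp [this]
    have hfr : (t.filter (fun k => !(f k == f n))).filter (fun k => f k == b)
        = t.filter (fun k => f k == b) := by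
      rw [List.filter_filter]
      apply List.filter_congr
      intro k _
      cases hk : (f k == b) with
      | false => simp
      | true =>
        have : (f k == f n) = false := by
          have : f k = b := by simpa using hk
          simpa [this] using hbne
        simp [this]
    rw [hfl, hfr]
termination_by l => l.length
decreasing_by simpa using Nat.lt_succ_of_le (List.length_filter_le _ t)

-- ===== VERDICT (by name: the statement is the Claim_ definition above) =====
theorem build_implementation_index_py_spec : Claim_equal_build_implementation_index_py := by
  intro public_registry _
  show build_implementation_index_py public_registry
      = build_implementation_index_py_alt public_registry
  have hnorm : pvNormB = pvNormalizeBase := funext pvNormB_eq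
  show (((PySem.Dict.ofList public_registry).keys).foldl pvStepA PySem.Dict.empty).items.map
        (fun p => (p.1, PySem.List.sorted p.2 (fun x => x) false))
      = pvGroupRec ((pvElig ((PySem.Dict.ofList public_registry).keys)).map
          (fun name => (name, pvNormB name)))
  rw [pvGroupRecGen_eq pvNormB, hnorm,
    pvGroups_invariant _ (PySem.Dict.nodup_keys_ofList public_registry), List.map_map]
  rfl
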